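-- pv_equiv track=rewrite | github.com/ChenshuXu/Foundations-of-Artificial-Intelligence | little go game/myplayer_play/QLearner/s2_submit/cnt27/GameBoard.py | find_died_pieces
-- ===== SOURCE A (Python) =====
-- def detect_neighbor(board, i, j):
--     """
--     Detect all the neighbors of a given stone.
--
--     :param i: row number of the board.
--     :param j: column number of the board.
--     :return: a list containing the neighbors row and column (row, column) of position (i, j).
--     """
--     neighbors = []
--     # Detect borders and add neighbor coordinates
--     if i > 0:
--         neighbors.append((i - 1, j))
--     if i < 4:
--         neighbors.append((i + 1, j))
--     if j > 0:
--         neighbors.append((i, j - 1))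
--     if j < 4:
--         neighbors.append((i, j + 1))
--     return neighbors
--
-- def detect_neighbor_ally(board, i, j):
--     """
--     Detect the neighbor allies of a given stone.
--
--     :param i: row number of the board.
--     :param j: column number of the board.
--     :return: a list containing the neighbored allies row and column (row, column) of position (i, j).
--     """
--     neighbors = detect_neighbor(board, i, j)  # Detect neighbors
--     group_allies = []
--     # Iterate through neighbors
--     for piece in neighbors:
--         # Add to allies list if having the same color
--         if board[piece[0]][piece[1]] == board[i][j]:
--             group_allies.append(piece)
--     return group_allies
--
-- def ally_dfs(board, i, j):
--     """
--     Using DFS to search for all allies of a given stone.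
--
--     :param i: row number of the board.
--     :param j: column number of the board.
--     :return: a list containing the all allies row and column (row, column) of position (i, j).
--     """
--     stack = [(i, j)]  # stack for DFS serach
--     ally_members = []  # record allies positions during the search
--     while stack:
--         piece = stack.pop()
--         ally_members.append(piece)
--         neighbor_allies = detect_neighbor_ally(board, piece[0], piece[1])
--         for ally in neighbor_allies:
--             if ally not in stack and ally not in ally_members:
--                 stack.append(ally)
--     return ally_members
--
-- def find_liberty(board, i, j):
--     """
--     Find liberty of a given stone. If a group of allied stones has no liberty, they all die.
--
--     :param i: row number of the board.
--     :param j: column number of the board.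
--     :return: boolean indicating whether the given stone still has liberty.
--     """
--     # TODO: use board int
--     ally_members = ally_dfs(board, i, j)
--     for member in ally_members:
--         neighbors = detect_neighbor(board, member[0], member[1])
--         for piece in neighbors:
--             # If there is empty space around a piece, it has liberty
--             if board[piece[0]][piece[1]] == 0:
--                 return True
--     # If none of the pieces in a allied group has an empty space, it has no liberty
--     return False
--
-- def find_died_pieces(board, piece_type):
--     """
--     Find the died stones that has no liberty in the board for a given piece type.
--
--     :param piece_type: 1('X') or 2('O').
--     :return: a list containing the dead pieces row and column(row, column).
--     """
--     died_pieces = []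
--
--     for i in range(5):
--         for j in range(5):
--             # Check if there is a piece at this position:
--             if board[i][j] == piece_type:
--                 # The piece die if it has no liberty
--                 if not find_liberty(board, i, j):
--                     died_pieces.append((i, j))
--     return died_pieces
-- ===== SOURCE B (Python) =====
-- def find_died_pieces(board, piece_type):
--     # Liberty propagation: flood "alive" outward from stones touching an empty
--     # point, instead of running a DFS from every stone separately.
--     cells = [(i, j) for i in range(5) for j in range(5) if board[i][j] == piece_type]
--
--     def nbrs(i, j):
--         out = []
--         if i > 0:
--             out.append((i - 1, j))
--         if i < 4:
--             out.append((i + 1, j))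
--         if j > 0:
--             out.append((i, j - 1))
--         if j < 4:
--             out.append((i, j + 1))
--         return out
--
--     alive = [c for c in cells if any(board[a][b] == 0 for (a, b) in nbrs(*c))]
--     changed = True
--     while changed:
--         changed = False
--         for c in cells:
--             if c not in alive and any(n in alive for n in nbrs(*c)):
--                 alive.append(c)
--                 changed = True
--     return [c for c in cells if c not in alive]
-- ===== Notes on version B (the rewrite author's own statement) =====
-- stated objective: alternative
-- what changed: Replaces the per-stone DFS (ally_dfs restarted from every stone) by a single liberty-propagation fixpoint: stones adjacent to an empty point seed an 'alive' set that is iterated to closure, and dead stones are the piece_type stones left out, emitted in the same row-major order.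
import Mathlib
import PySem

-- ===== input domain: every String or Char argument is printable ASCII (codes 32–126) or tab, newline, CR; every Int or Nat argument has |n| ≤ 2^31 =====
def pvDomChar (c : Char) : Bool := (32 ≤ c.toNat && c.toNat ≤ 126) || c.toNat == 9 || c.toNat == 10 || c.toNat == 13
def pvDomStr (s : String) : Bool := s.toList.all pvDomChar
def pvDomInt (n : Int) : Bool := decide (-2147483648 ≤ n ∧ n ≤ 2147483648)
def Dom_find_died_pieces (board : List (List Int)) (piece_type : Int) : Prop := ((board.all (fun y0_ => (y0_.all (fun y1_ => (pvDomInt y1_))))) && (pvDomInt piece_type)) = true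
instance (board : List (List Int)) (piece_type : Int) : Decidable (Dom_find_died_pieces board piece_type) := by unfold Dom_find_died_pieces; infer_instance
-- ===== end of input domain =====

-- B replaces A's per-stone DFS by one liberty-propagation fixpoint over the board
-- (alternative algorithm, same exact output in the same row-major order).

-- ===== PORT A =====
-- board[i][j]; the default value is only reached where the Python raises IndexError,
-- which Pre_find_died_pieces excludes (all reads are at 0 ≤ i,j ≤ 4).
def cellAt (board : List (List Int)) (i j : Int) : Int :=
  (PySem.List.pyGet? ((PySem.List.pyGet? board i).getD []) j).getD (-7)

def detect_neighbor (board : List (List Int)) (i j : Int) : List (Int × Int) :=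
  (if 0 < i then [(i - 1, j)] else []) ++ (if i < 4 then [(i + 1, j)] else []) ++
  (if 0 < j then [(i, j - 1)] else []) ++ (if j < 4 then [(i, j + 1)] else [])

def detect_neighbor_ally (board : List (List Int)) (i j : Int) : List (Int × Int) :=
  (detect_neighbor board i j).filter (fun p => cellAt board p.1 p.2 == cellAt board i j)

-- Python appends `ally` to the end of the stack unless it is already on the stack or recorded.
def pushF (ally' : List (Int × Int)) (st : List (Int × Int)) (a : Int × Int) : List (Int × Int) :=
  if st.contains a || ally'.contains a then st else st.concat a

-- `while stack:` with pop() from the end; fuel 100 is an upper bound on the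
-- iteration count (≤ 26 on a 5×5 board, proved below), it only makes the loop total.
def allyDfsLoop (board : List (List Int)) : Nat → List (Int × Int) → List (Int × Int) → List (Int × Int)
  | 0, _, ally => ally
  | fuel+1, stack, ally =>
    match stack.getLast? with
    | none => ally
    | some piece =>
      let ally' := ally ++ [piece]
      let stack' := (detect_neighbor_ally board piece.1 piece.2).foldl (pushF ally') stack.dropLast
      allyDfsLoop board fuel stack' ally'

def ally_dfs (board : List (List Int)) (i j : Int) : List (Int × Int) :=
  allyDfsLoop board 100 [(i, j)] []

def find_liberty (board : List (List Int)) (i j : Int) : Bool :=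
  (ally_dfs board i j).any (fun m =>
    (detect_neighbor board m.1 m.2).any (fun p => cellAt board p.1 p.2 == 0))

def find_died_pieces (board : List (List Int)) (piece_type : Int) : List (Int × Int) :=
  (PySem.List.pyRange 0 5 1).flatMap (fun i =>
    ((PySem.List.pyRange 0 5 1).filter (fun j =>
        cellAt board i j == piece_type && !find_liberty board i j)).map (fun j => (i, j)))

-- ===== PORT B =====
def altNbrs (i j : Int) : List (Int × Int) :=
  (if 0 < i then [(i - 1, j)] else []) ++ (if i < 4 then [(i + 1, j)] else []) ++
  (if 0 < j then [(i, j - 1)] else []) ++ (if j < 4 then [(i, j + 1)] else [])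

-- [(i, j) for i in range(5) for j in range(5) if board[i][j] == piece_type]
def altCells (board : List (List Int)) (piece_type : Int) : List (Int × Int) :=
  (PySem.List.pyRange 0 5 1).flatMap (fun i =>
    ((PySem.List.pyRange 0 5 1).filter (fun j => cellAt board i j == piece_type)).map (fun j => (i, j)))

-- one `for c in cells:` pass of the while-loop body; the Bool is the `changed` flag
def passF (p : List (Int × Int) × Bool) (c : Int × Int) : List (Int × Int) × Bool :=
  if !p.1.contains c && (altNbrs c.1 c.2).any (fun n => p.1.contains n) then (p.1.concat c, true) else p

def altPass (cells alive : List (Int × Int)) : List (Int × Int) × Bool :=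
  cells.foldl passF (alive, false)

-- `while changed:`; fuel 26 bounds the passes (alive grows strictly, ≤ 25 cells; proved below)
def altLoop (cells : List (Int × Int)) : Nat → List (Int × Int) → List (Int × Int)
  | 0, alive => alive
  | fuel+1, alive =>
    let p := altPass cells alive
    if p.2 then altLoop cells fuel p.1 else alive

def find_died_pieces_alt (board : List (List Int)) (piece_type : Int) : List (Int × Int) :=
  let cells := altCells board piece_type
  let seeds := cells.filter (fun c => (altNbrs c.1 c.2).any (fun n => cellAt board n.1 n.2 == 0))
  let alive := altLoop cells 26 seeds
  cells.filter (fun c => !alive.contains c)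

-- ===== PRECONDITION & SPEC =====
-- A reads board[i][j] for all 0 ≤ i,j ≤ 4 and raises IndexError otherwise;
-- Pre_ is exactly the boards with at least 5 rows whose first 5 rows have at least 5 entries.
def Pre_find_died_pieces (board : List (List Int)) (piece_type : Int) : Prop :=
  5 ≤ board.length ∧ ∀ r ∈ board.take 5, 5 ≤ r.length

instance (board : List (List Int)) (piece_type : Int) : Decidable (Pre_find_died_pieces board piece_type) := by
  unfold Pre_find_died_pieces; infer_instance

def pvWitness_find_died_pieces : List (List Int) × Int :=
  ([[0, 1, 2, 0, 0], [0, 1, 2, 0, 0], [0, 1, 2, 0, 0], [1, 1, 2, 0, 0], [2, 2, 2, 0, 0]], 1)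

def Spec_find_died_pieces (board : List (List Int)) (piece_type : Int) (out : List (Int × Int)) : Prop := out = find_died_pieces_alt board piece_type
instance (board : List (List Int)) (piece_type : Int) (out : List (Int × Int)) : Decidable (Spec_find_died_pieces board piece_type out) := by unfold Spec_find_died_pieces; infer_instance

-- ===== CLAIM (what is proved, stated in full; the proofs are below) =====
def Claim_equal_find_died_pieces : Prop := ∀ (board : List (List Int)) (piece_type : Int), Dom_find_died_pieces board piece_type → Pre_find_died_pieces board piece_type → Spec_find_died_pieces board piece_type (find_died_pieces board piece_type)

-- ===== LEMMAS AND PROOFS =====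

def InGrid (c : Int × Int) : Prop := 0 ≤ c.1 ∧ c.1 ≤ 4 ∧ 0 ≤ c.2 ∧ c.2 ≤ 4

def hasLib (board : List (List Int)) (d : Int × Int) : Bool :=
  (altNbrs d.1 d.2).any (fun p => cellAt board p.1 p.2 == 0)

def StepT (board : List (List Int)) (t : Int) (a b : Int × Int) : Prop :=
  b ∈ altNbrs a.1 a.2 ∧ cellAt board b.1 b.2 = t

def ReachT (board : List (List Int)) (t : Int) : Int × Int → Int × Int → Prop :=
  Relation.ReflTransGen (StepT board t)

def AliveSpec (board : List (List Int)) (t : Int) (c : Int × Int) : Prop :=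
  ∃ d, ReachT board t c d ∧ hasLib board d = true

def gridL : List (Int × Int) :=
  [(0,0),(0,1),(0,2),(0,3),(0,4),(1,0),(1,1),(1,2),(1,3),(1,4),(2,0),(2,1),(2,2),(2,3),(2,4),
   (3,0),(3,1),(3,2),(3,3),(3,4),(4,0),(4,1),(4,2),(4,3),(4,4)]

lemma detect_eq_altNbrs (board : List (List Int)) (i j : Int) :
    detect_neighbor board i j = altNbrs i j := rfl

lemma nbr_grid {a b : Int × Int} (ha : InGrid a) (hb : b ∈ altNbrs a.1 a.2) : InGrid b := by
  obtain ⟨ha1, ha2, ha3, ha4⟩ := ha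
  unfold altNbrs at hb
  split_ifs at hb <;> simp_all [InGrid, Prod.ext_iff] <;> omega

lemma mem_gridL {c : Int × Int} : c ∈ gridL ↔ InGrid c := by
  obtain ⟨x, y⟩ := c
  constructor
  · intro h
    simp [gridL, Prod.ext_iff] at h
    simp only [InGrid]
    omega
  · rintro ⟨h1, h2, h3, h4⟩
    have hx : x = 0 ∨ x = 1 ∨ x = 2 ∨ x = 3 ∨ x = 4 := by omega
    have hy : y = 0 ∨ y = 1 ∨ y = 2 ∨ y = 3 ∨ y = 4 := by omega
    rcases hx with rfl | rfl | rfl | rfl | rfl <;> rcases hy with rfl | rfl | rfl | rfl | rfl <;> decide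

lemma reach_grid {board t} {c d : Int × Int} (hc : InGrid c) (h : ReachT board t c d) : InGrid d := by
  unfold ReachT at h
  induction h with
  | refl => exact hc
  | tail h1 h2 ih => exact nbr_grid ih h2.1

lemma reach_cell {board t} {c d : Int × Int} (hc : cellAt board c.1 c.2 = t) (h : ReachT board t c d) :
    cellAt board d.1 d.2 = t := by
  unfold ReachT at h
  induction h with
  | refl => exact hc
  | tail h1 h2 ih => exact h2.2

lemma allies_iff {board t} {a b : Int × Int} (ha : cellAt board a.1 a.2 = t) :
    b ∈ detect_neighbor_ally board a.1 a.2 ↔ StepT board t a b := by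
  simp [detect_neighbor_ally, detect_eq_altNbrs, List.mem_filter, ha, StepT]

lemma mem_altCells {board t} {c : Int × Int} :
    c ∈ altCells board t ↔ InGrid c ∧ cellAt board c.1 c.2 = t := by
  obtain ⟨x, y⟩ := c
  simp only [altCells, List.mem_flatMap, List.mem_map, List.mem_filter,
    PySem.List.mem_pyRange_one, InGrid]
  constructor
  · rintro ⟨i, ⟨hi1, hi2⟩, j, ⟨⟨hj1, hj2⟩, hc⟩, heq⟩
    cases heq
    exact ⟨⟨hi1, by omega, hj1, by omega⟩, by simpa using hc⟩
  · rintro ⟨⟨h1, h2, h3, h4⟩, hc⟩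
    exact ⟨x, ⟨h1, by omega⟩, y, ⟨⟨h3, by omega⟩, by simpa using hc⟩, rfl⟩

lemma nodup_altCells (board : List (List Int)) (t : Int) : (altCells board t).Nodup := by
  unfold altCells
  rw [List.nodup_flatMap]
  constructor
  · intro i _
    exact (((PySem.List.nodup_pyRange_one 0 5)).filter _).map (fun a b h => by injection h)
  · apply List.Pairwise.imp ?_ (PySem.List.nodup_pyRange_one 0 5)
    intro a b hab x hx hx'
    simp only [List.mem_map, List.mem_filter] at hx hx'
    obtain ⟨j, _, rfl⟩ := hx
    obtain ⟨j', _, h'⟩ := hx'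
    injection h' with h1 h2
    exact hab h1.symm

-- ===== push-fold lemmas (A's inner `for ally in neighbor_allies` loop) =====

lemma pushF_step_subset {A' st : List (Int × Int)} {a : Int × Int} : st ⊆ pushF A' st a := by
  unfold pushF
  split
  · exact fun x h => h
  · intro x h
    simp only [List.concat_eq_append, List.mem_append]
    exact Or.inl h

lemma pushF_subset {A' : List (Int × Int)} : ∀ (l st : List (Int × Int)), st ⊆ l.foldl (pushF A') st := by
  intro l
  induction l with
  | nil => intro st; simp [List.foldl]
  | cons a l ih =>
    intro st
    exact List.Subset.trans pushF_step_subset (ih (pushF A' st a))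

lemma pushF_mem {A' : List (Int × Int)} : ∀ (l st : List (Int × Int)) (x : Int × Int),
    x ∈ l.foldl (pushF A') st → x ∈ st ∨ x ∈ l := by
  intro l
  induction l with
  | nil => intro st x hx; exact Or.inl hx
  | cons a l ih =>
    intro st x hx
    rcases ih (pushF A' st a) x hx with h | h
    · unfold pushF at h
      split at h
      · exact Or.inl h
      · simp only [List.concat_eq_append, List.mem_append, List.mem_singleton] at h
        rcases h with h | h
        · exact Or.inl h
        · exact Or.inr (by simp [h])
    · exact Or.inr (List.mem_cons_of_mem a h)

lemma pushF_covers {A' : List (Int × Int)} : ∀ (l st : List (Int × Int)) (b : Int × Int),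
    b ∈ l → b ∈ l.foldl (pushF A') st ∨ b ∈ A' := by
  intro l
  induction l with
  | nil => intro st b hb; cases hb
  | cons a l ih =>
    intro st b hb
    rcases List.mem_cons.mp hb with rfl | hb
    · by_cases hA : b ∈ A'
      · exact Or.inr hA
      · left
        apply pushF_subset l (pushF A' st b)
        unfold pushF
        split
        · next hcond =>
          rcases Bool.or_eq_true_iff.mp hcond with h | h
          · exact List.contains_iff_mem.mp h
          · exact absurd (List.contains_iff_mem.mp h) hA
        · simp [List.concat_eq_append]
    · exact ih (pushF A' st a) b hb

lemma pushF_nodup {A' : List (Int × Int)} : ∀ (l st : List (Int × Int)),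
    (st ++ A').Nodup → (l.foldl (pushF A') st ++ A').Nodup := by
  intro l
  induction l with
  | nil => intro st h; exact h
  | cons a l ih =>
    intro st h
    apply ih
    unfold pushF
    split
    · exact h
    · next hcond =>
      simp only [Bool.or_eq_true, List.contains_iff_mem, not_or] at hcond
      have heq : st.concat a ++ A' = st ++ a :: A' := by
        simp [List.concat_eq_append]
      rw [heq, List.Perm.nodup_iff List.perm_middle]
      simp only [List.nodup_cons]
      refine ⟨by simpa using hcond, h⟩

-- ===== DFS correctness =====

lemma dfs_sound (board : List (List Int)) (Q : Int × Int → Prop)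
    (closed : ∀ a b, Q a → b ∈ detect_neighbor_ally board a.1 a.2 → Q b) :
    ∀ (fuel : Nat) (S A : List (Int × Int)), (∀ x ∈ S, Q x) → (∀ x ∈ A, Q x) →
      ∀ x ∈ allyDfsLoop board fuel S A, Q x := by
  intro fuel
  induction fuel with
  | zero => intro S A hS hA x hx; exact hA x (by simpa [allyDfsLoop] using hx)
  | succ fuel ih =>
    intro S A hS hA x hx
    cases h : S.getLast? with
    | none =>
      simp only [allyDfsLoop, h] at hx
      exact hA x hx
    | some piece =>
      obtain ⟨S₀, rfl⟩ := List.getLast?_eq_some_iff.mp h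
      have hpiece : Q piece := hS piece (by simp)
      simp only [allyDfsLoop, h, List.dropLast_concat] at hx
      refine ih _ _ ?_ ?_ x hx
      · intro y hy
        rcases pushF_mem _ _ y hy with h1 | h1
        · exact hS y (List.mem_append_left _ h1)
        · exact closed piece y hpiece h1
      · intro y hy
        rcases List.mem_append.mp hy with h1 | h1
        · exact hA y h1
        · have : y = piece := by simpa using h1
          exact this ▸ hpiece

lemma dfs_run (board : List (List Int)) (t : Int) :
    ∀ (fuel : Nat) (S A : List (Int × Int)),
      (S ++ A).Nodup →
      (∀ x ∈ S ++ A, InGrid x ∧ cellAt board x.1 x.2 = t) →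
      (∀ a ∈ A, ∀ b ∈ detect_neighbor_ally board a.1 a.2, b ∈ S ∨ b ∈ A) →
      26 ≤ fuel + A.length →
      (∀ x ∈ S ++ A, x ∈ allyDfsLoop board fuel S A) ∧
      (∀ a ∈ allyDfsLoop board fuel S A, ∀ b ∈ detect_neighbor_ally board a.1 a.2,
        b ∈ allyDfsLoop board fuel S A) := by
  intro fuel
  induction fuel with
  | zero =>
    intro S A hnd hgrid hcl hfuel
    exfalso
    have hsub : (S ++ A) ⊆ gridL := fun x hx => mem_gridL.mpr (hgrid x hx).1
    have hlen := (List.subperm_of_subset hnd hsub).length_le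
    simp [gridL] at hlen
    omega
  | succ fuel ih =>
    intro S A hnd hgrid hcl hfuel
    cases h : S.getLast? with
    | none =>
      have hSnil : S = [] := by simpa using h
      subst hSnil
      simp only [allyDfsLoop, h, List.nil_append]
      refine ⟨fun x hx => hx, fun a ha b hb => ?_⟩
      rcases hcl a ha b hb with h1 | h1
      · cases h1
      · exact h1
    | some piece =>
      obtain ⟨S₀, rfl⟩ := List.getLast?_eq_some_iff.mp h
      have hPpiece := hgrid piece (by simp)
      have hallies : ∀ b ∈ detect_neighbor_ally board piece.1 piece.2,
          InGrid b ∧ cellAt board b.1 b.2 = t := by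
        intro b hb
        have hstep := (allies_iff hPpiece.2).mp hb
        exact ⟨nbr_grid hPpiece.1 hstep.1, hstep.2⟩
      have hperm : List.Perm ((S₀ ++ [piece]) ++ A) (S₀ ++ (A ++ [piece])) := by
        rw [List.append_assoc]
        exact List.Perm.append_left S₀ List.perm_append_comm
      have hnd' : (S₀ ++ (A ++ [piece])).Nodup := (List.Perm.nodup_iff hperm).mp hnd
      simp only [allyDfsLoop, h, List.dropLast_concat]
      have hrun := ih ((detect_neighbor_ally board piece.1 piece.2).foldl (pushF (A ++ [piece])) S₀)
        (A ++ [piece])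
        (pushF_nodup _ S₀ hnd')
        (by
          intro x hx
          rcases List.mem_append.mp hx with h1 | h1
          · rcases pushF_mem _ _ x h1 with h2 | h2
            · exact hgrid x (by simp [h2])
            · exact hallies x h2
          · rcases List.mem_append.mp h1 with h2 | h2
            · exact hgrid x (by simp [h2])
            · have : x = piece := by simpa using h2
              exact this ▸ hPpiece)
        (by
          intro a ha b hb
          rcases List.mem_append.mp ha with h1 | h1
          · rcases hcl a h1 b hb with h2 | h2
            · rcases List.mem_append.mp h2 with h3 | h3
              · exact Or.inl (pushF_subset _ S₀ h3)
              · exact Or.inr (List.mem_append_right _ h3)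
            · exact Or.inr (List.mem_append_left _ h2)
          · have : a = piece := by simpa using h1
            subst this
            exact pushF_covers _ S₀ b hb)
        (by simp at hfuel ⊢; omega)
      refine ⟨?_, hrun.2⟩
      intro x hx
      rcases List.mem_append.mp hx with h1 | h1
      · rcases List.mem_append.mp h1 with h2 | h2
        · exact hrun.1 x (List.mem_append_left _ (pushF_subset _ S₀ h2))
        · exact hrun.1 x (List.mem_append_right _ (List.mem_append_right _ h2))
      · exact hrun.1 x (List.mem_append_right _ (List.mem_append_left _ h1))

lemma ally_dfs_iff {board t} {c x : Int × Int} (hc : InGrid c) (hct : cellAt board c.1 c.2 = t) :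
    x ∈ ally_dfs board c.1 c.2 ↔ ReachT board t c x := by
  unfold ally_dfs
  have hrun := dfs_run board t 100 [(c.1, c.2)] []
    (by simp)
    (by intro x hx; simp at hx; subst hx; exact ⟨hc, hct⟩)
    (by simp)
    (by simp)
  constructor
  · intro hx
    refine dfs_sound board (ReachT board t c) ?_ 100 [(c.1, c.2)] [] ?_ (by simp) x hx
    · intro a b hQ hb
      have hcell := reach_cell hct hQ
      exact Relation.ReflTransGen.tail hQ ((allies_iff hcell).mp hb)
    · intro y hy
      simp at hy
      subst hy
      exact Relation.ReflTransGen.refl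
  · intro hr
    unfold ReachT at hr
    induction hr with
    | refl => exact hrun.1 (c.1, c.2) (by simp)
    | tail h1 h2 ih =>
      have hcell := reach_cell hct h1
      exact hrun.2 _ ih _ ((allies_iff hcell).mpr h2)

lemma find_liberty_iff {board t} {c : Int × Int} (hc : InGrid c) (hct : cellAt board c.1 c.2 = t) :
    find_liberty board c.1 c.2 = true ↔ AliveSpec board t c := by
  unfold find_liberty AliveSpec
  rw [List.any_eq_true]
  constructor
  · rintro ⟨m, hm, hlib⟩
    exact ⟨m, (ally_dfs_iff hc hct).mp hm, by simpa [hasLib, detect_eq_altNbrs] using hlib⟩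
  · rintro ⟨d, hr, hlib⟩
    exact ⟨d, (ally_dfs_iff hc hct).mpr hr, by simpa [hasLib, detect_eq_altNbrs] using hlib⟩

-- ===== fixpoint-pass lemmas (B's `for c in cells` pass) =====

lemma passF_flag : ∀ (l : List (Int × Int)) (p : List (Int × Int) × Bool),
    p.2 = true → (l.foldl passF p).2 = true := by
  intro l
  induction l with
  | nil => intro p hp; exact hp
  | cons a l ih =>
    intro p hp
    apply ih
    unfold passF
    split
    · rfl
    · exact hp

lemma passF_step_subset {p : List (Int × Int) × Bool} {a : Int × Int} : p.1 ⊆ (passF p a).1 := by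
  unfold passF
  split
  · intro x hx
    simp only [List.concat_eq_append, List.mem_append]
    exact Or.inl hx
  · exact fun x hx => hx

lemma passF_subset : ∀ (l : List (Int × Int)) (p : List (Int × Int) × Bool),
    p.1 ⊆ (l.foldl passF p).1 := by
  intro l
  induction l with
  | nil => intro p; exact fun x hx => hx
  | cons a l ih =>
    intro p
    exact List.Subset.trans passF_step_subset (ih (passF p a))

lemma passF_mem : ∀ (l : List (Int × Int)) (p : List (Int × Int) × Bool) (x : Int × Int),
    x ∈ (l.foldl passF p).1 → x ∈ p.1 ∨ x ∈ l := by
  intro l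
  induction l with
  | nil => intro p x hx; exact Or.inl hx
  | cons a l ih =>
    intro p x hx
    rcases ih (passF p a) x hx with h | h
    · unfold passF at h
      split at h
      · simp only [List.concat_eq_append, List.mem_append, List.mem_singleton] at h
        rcases h with h | h
        · exact Or.inl h
        · exact Or.inr (by simp [h])
      · exact Or.inl h
    · exact Or.inr (List.mem_cons_of_mem a h)

lemma passF_len : ∀ (l : List (Int × Int)) (p : List (Int × Int) × Bool),
    p.1.length ≤ (l.foldl passF p).1.length := by
  intro l
  induction l with
  | nil => intro p; exact le_rfl
  | cons a l ih =>
    intro p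
    refine le_trans ?_ (ih (passF p a))
    unfold passF
    split
    · simp [List.concat_eq_append]
    · exact le_rfl

lemma passF_grow : ∀ (l : List (Int × Int)) (p : List (Int × Int) × Bool),
    (l.foldl passF p).2 = true → p.2 = false → p.1.length + 1 ≤ (l.foldl passF p).1.length := by
  intro l
  induction l with
  | nil => intro p h1 h2; rw [List.foldl_nil] at h1; rw [h1] at h2; cases h2
  | cons a l ih =>
    intro p h1 h2
    by_cases hc : (!p.1.contains a && (altNbrs a.1 a.2).any (fun n => p.1.contains n)) = true
    · have hstep : passF p a = (p.1 ++ [a], true) := by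
        unfold passF; rw [if_pos hc, List.concat_eq_append]
      rw [List.foldl_cons, hstep]
      have := passF_len l (p.1 ++ [a], true)
      simp only [List.length_append, List.length_singleton] at this
      omega
    · have hstep : passF p a = p := by unfold passF; rw [if_neg hc]
      rw [List.foldl_cons, hstep] at h1 ⊢
      exact ih p h1 h2

lemma passF_stable : ∀ (l : List (Int × Int)) (p : List (Int × Int) × Bool),
    p.2 = false → (l.foldl passF p).2 = false →
    (l.foldl passF p).1 = p.1 ∧ ∀ c ∈ l, c ∉ p.1 → ∀ n ∈ altNbrs c.1 c.2, n ∉ p.1 := by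
  intro l
  induction l with
  | nil => intro p h1 h2; exact ⟨rfl, fun c hc => absurd hc (List.not_mem_nil)⟩
  | cons a l ih =>
    intro p h1 h2
    by_cases hc : (!p.1.contains a && (altNbrs a.1 a.2).any (fun n => p.1.contains n)) = true
    · exfalso
      have hstep : passF p a = (p.1.concat a, true) := by unfold passF; rw [if_pos hc]
      rw [List.foldl_cons, hstep] at h2
      rw [passF_flag l _ rfl] at h2
      cases h2
    · have hstep : passF p a = p := by unfold passF; rw [if_neg hc]
      rw [List.foldl_cons, hstep] at h2 ⊢
      obtain ⟨heq, hstab⟩ := ih p h1 h2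
      refine ⟨heq, ?_⟩
      intro c hcmem hcnot n hn
      rcases List.mem_cons.mp hcmem with rfl | hcmem
      · simp only [Bool.and_eq_true, Bool.not_eq_true', List.any_eq_true, not_and,
          not_exists, Bool.not_eq_true] at hc
        have hcf : p.1.contains c = false := by
          rw [← Bool.not_eq_true, List.contains_iff_mem]
          simpa using hcnot
        have h3 := hc hcf n hn
        intro hmem
        rw [List.contains_iff_mem.mpr hmem] at h3
        cases h3
      · exact hstab c hcmem hcnot n hn

lemma passF_nodup : ∀ (l : List (Int × Int)) (p : List (Int × Int) × Bool),
    p.1.Nodup → (l.foldl passF p).1.Nodup := by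
  intro l
  induction l with
  | nil => intro p h; exact h
  | cons a l ih =>
    intro p h
    apply ih
    unfold passF
    split
    · next hc =>
      have ha : a ∉ p.1 := by
        intro hmem
        simp [hmem] at hc
      simp [List.concat_eq_append, List.nodup_append, h]
      exact fun x y hxy heq => ha (heq ▸ hxy)
    · exact h

lemma passF_sound (board : List (List Int)) (t : Int) :
    ∀ (l : List (Int × Int)) (p : List (Int × Int) × Bool),
      (∀ c ∈ l, c ∈ altCells board t) →
      (∀ x ∈ p.1, x ∈ altCells board t ∧ AliveSpec board t x) →
      ∀ x ∈ (l.foldl passF p).1, x ∈ altCells board t ∧ AliveSpec board t x := by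
  intro l
  induction l with
  | nil => intro p _ hp x hx; exact hp x hx
  | cons a l ih =>
    intro p hl hp x hx
    refine ih (passF p a) (fun c hc => hl c (List.mem_cons_of_mem a hc)) ?_ x hx
    intro y hy
    unfold passF at hy
    split at hy
    · next hc =>
      simp only [List.concat_eq_append, List.mem_append, List.mem_singleton] at hy
      rcases hy with hy | rfl
      · exact hp y hy
      · refine ⟨hl y (by simp), ?_⟩
        simp only [Bool.and_eq_true, List.any_eq_true, List.contains_iff_mem] at hc
        obtain ⟨-, n, hn, hnmem⟩ := hc
        obtain ⟨hncells, d, hreach, hlib⟩ := hp n hnmem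
        have hncell : cellAt board n.1 n.2 = t := (mem_altCells.mp hncells).2
        exact ⟨d, Relation.ReflTransGen.head ⟨hn, hncell⟩ hreach, hlib⟩
    · exact hp y hy

-- ===== fixpoint-loop lemmas =====

lemma loop_sound (board : List (List Int)) (t : Int) :
    ∀ (fuel : Nat) (alive : List (Int × Int)),
      (∀ x ∈ alive, x ∈ altCells board t ∧ AliveSpec board t x) →
      ∀ x ∈ altLoop (altCells board t) fuel alive, x ∈ altCells board t ∧ AliveSpec board t x := by
  intro fuel
  induction fuel with
  | zero => intro alive hinv x hx; exact hinv x (by simpa [altLoop] using hx)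
  | succ fuel ih =>
    intro alive hinv x hx
    simp only [altLoop] at hx
    by_cases hp : (altPass (altCells board t) alive).2 = true
    · rw [if_pos hp] at hx
      refine ih _ ?_ x hx
      exact passF_sound board t _ (alive, false) (fun c hc => hc) (fun y hy => hinv y hy)
    · rw [if_neg hp] at hx
      exact hinv x hx

lemma loop_run (board : List (List Int)) (t : Int) :
    ∀ (fuel : Nat) (alive : List (Int × Int)),
      alive.Nodup → (∀ x ∈ alive, x ∈ altCells board t) →
      26 ≤ fuel + alive.length →
      (∀ x ∈ alive, x ∈ altLoop (altCells board t) fuel alive) ∧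
      (∀ c ∈ altCells board t, c ∉ altLoop (altCells board t) fuel alive →
        ∀ n ∈ altNbrs c.1 c.2, n ∉ altLoop (altCells board t) fuel alive) := by
  intro fuel
  induction fuel with
  | zero =>
    intro alive hnd hsub hfuel
    exfalso
    have hsub' : alive ⊆ gridL := fun x hx => mem_gridL.mpr (mem_altCells.mp (hsub x hx)).1
    have hlen := (List.subperm_of_subset hnd hsub').length_le
    simp [gridL] at hlen
    omega
  | succ fuel ih =>
    intro alive hnd hsub hfuel
    by_cases hp : (altPass (altCells board t) alive).2 = true
    · have hred : altLoop (altCells board t) (fuel+1) alive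
          = altLoop (altCells board t) fuel (altPass (altCells board t) alive).1 := by
        simp only [altLoop, if_pos hp]
      rw [hred]
      have hgrow : alive.length + 1 ≤ (altPass (altCells board t) alive).1.length :=
        passF_grow (altCells board t) (alive, false) hp rfl
      have hrun := ih (altPass (altCells board t) alive).1
        (passF_nodup _ (alive, false) hnd)
        (by
          intro x hx
          rcases passF_mem _ (alive, false) x hx with h | h
          · exact hsub x h
          · exact h)
        (by omega)
      exact ⟨fun x hx => hrun.1 x (passF_subset _ (alive, false) hx), hrun.2⟩
    · have hred : altLoop (altCells board t) (fuel+1) alive = alive := by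
        simp only [altLoop, if_neg hp]
      rw [hred]
      obtain ⟨-, hstab⟩ := passF_stable (altCells board t) (alive, false) rfl (by simpa using hp)
      exact ⟨fun x hx => hx, hstab⟩

lemma alt_alive_iff (board : List (List Int)) (t : Int) (c : Int × Int) :
    c ∈ altLoop (altCells board t) 26
        ((altCells board t).filter (fun c => (altNbrs c.1 c.2).any (fun n => cellAt board n.1 n.2 == 0))) ↔
      (InGrid c ∧ cellAt board c.1 c.2 = t) ∧ AliveSpec board t c := by
  have hseeds : ∀ x ∈ (altCells board t).filter
      (fun c => (altNbrs c.1 c.2).any (fun n => cellAt board n.1 n.2 == 0)),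
      x ∈ altCells board t ∧ AliveSpec board t x := by
    intro x hx
    obtain ⟨hmem, hlib⟩ := List.mem_filter.mp hx
    exact ⟨hmem, x, Relation.ReflTransGen.refl, hlib⟩
  constructor
  · intro hx
    have := loop_sound board t 26 ((altCells board t).filter
        (fun c => (altNbrs c.1 c.2).any (fun n => cellAt board n.1 n.2 == 0))) hseeds c hx
    exact ⟨mem_altCells.mp this.1, this.2⟩
  · rintro ⟨⟨hg, hct⟩, d, hr, hlib⟩
    have hrun := loop_run board t 26 ((altCells board t).filter
        (fun c => (altNbrs c.1 c.2).any (fun n => cellAt board n.1 n.2 == 0)))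
      ((nodup_altCells board t).filter _)
      (fun x hx => (List.mem_filter.mp hx).1)
      (Nat.le_add_right 26 _)
    have hd : d ∈ altCells board t :=
      mem_altCells.mpr ⟨reach_grid hg hr, reach_cell hct hr⟩
    have hdF : d ∈ altLoop (altCells board t) 26 ((altCells board t).filter
        (fun c => (altNbrs c.1 c.2).any (fun n => cellAt board n.1 n.2 == 0))) :=
      hrun.1 d (List.mem_filter.mpr ⟨hd, hlib⟩)
    unfold ReachT at hr
    have aux : ∀ a, Relation.ReflTransGen (StepT board t) a d →
        a ∈ altCells board t →
        a ∈ altLoop (altCells board t) 26 ((altCells board t).filter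
          (fun c => (altNbrs c.1 c.2).any (fun n => cellAt board n.1 n.2 == 0))) := by
      intro a ha
      induction ha using Relation.ReflTransGen.head_induction_on with
      | refl => intro _; exact hdF
      | @head a b step tail ih =>
        intro hacell
        by_cases haF : a ∈ altLoop (altCells board t) 26 ((altCells board t).filter
          (fun c => (altNbrs c.1 c.2).any (fun n => cellAt board n.1 n.2 == 0)))
        · exact haF
        · exfalso
          have hb := mem_altCells.mpr
            ⟨nbr_grid (mem_altCells.mp hacell).1 step.1, step.2⟩
          exact hrun.2 a hacell haF b step.1 (ih hb)
    exact aux c hr (mem_altCells.mpr ⟨hg, hct⟩)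

-- ===== assembly =====

lemma list_filter_flatMap {α β : Type} (l : List α) (f : α → List β) (p : β → Bool) :
    (l.flatMap f).filter p = l.flatMap (fun a => (f a).filter p) := by
  induction l with
  | nil => simp
  | cons a l ih => simp [List.filter_append, ih]

lemma main_eq (board : List (List Int)) (t : Int) :
    find_died_pieces board t = find_died_pieces_alt board t := by
  unfold find_died_pieces find_died_pieces_alt
  simp only []
  conv_rhs => rw [show altCells board t
      = (PySem.List.pyRange 0 5 1).flatMap (fun i =>
          ((PySem.List.pyRange 0 5 1).filter (fun j => cellAt board i j == t)).map
            (fun j => (i, j))) from rfl]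
  rw [list_filter_flatMap]
  apply List.flatMap_congr
  intro i hi
  rw [List.filter_map, List.filter_filter]
  congr 1
  apply List.filter_congr
  intro j hj
  simp only [Function.comp]
  by_cases hcell : cellAt board i j = t
  · have hgrid : InGrid (i, j) := by
      rw [PySem.List.mem_pyRange_one] at hi hj
      exact ⟨hi.1, by omega, hj.1, by omega⟩
    have hkey : find_liberty board i j = (altLoop (altCells board t) 26
        ((altCells board t).filter
          (fun c => (altNbrs c.1 c.2).any (fun n => cellAt board n.1 n.2 == 0)))).contains (i, j) := by
      rw [Bool.eq_iff_iff]
      rw [show ∀ l : List (Int × Int), (l.contains ((i, j) : Int × Int) = true ↔ (i, j) ∈ l)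
        from fun l => by simp]
      rw [alt_alive_iff board t (i, j)]
      rw [find_liberty_iff (c := ((i, j) : Int × Int)) hgrid hcell]
      constructor
      · intro h; exact ⟨⟨hgrid, hcell⟩, h⟩
      · intro h; exact h.2
    rw [hkey, Bool.and_comm]
    rfl
  · have : (cellAt board i j == t) = false := by simpa using hcell
    simp [this]

-- ===== VERDICT (by name: the statement is the Claim_ definition above) =====
theorem find_died_pieces_spec : Claim_equal_find_died_pieces := by
  intro board piece_type _ _
  unfold Spec_find_died_pieces
  exact main_eq board piece_type
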